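-- pv_equiv track=rewrite | github.com/newtasion/raas_cp | match_engine/simitems/job_coviewed_items.py | group_by_user_reducer
-- ===== SOURCE A (Python) =====
-- def group_by_user_reducer(user_id, values):
--     """
--     For each user, emit a row containing their "postings"
--     (item,rating pairs)
--     Also emit user rating sum and count for use later steps.
--
--     17    1,3,(70,3)
--     35    1,1,(21,1)
--     49    3,7,(19,2 21,1 70,4)
--     87    2,3,(19,1 21,2)
--     98    1,2,(19,2)
--     """
--     item_count = 0
--     item_sum = 0
--     final = []
--     for item_id, rating in values:
--         item_count += 1
--         item_sum += rating
--         final.append((item_id, rating))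
--
--     yield user_id, (item_count, item_sum, final)
-- ===== SOURCE B (Python) =====
-- def _summarize(vals):
--     # divide and conquer: combine (count, sum, pairs) of the two halves
--     n = len(vals)
--     if n == 0:
--         return 0, 0, []
--     if n == 1:
--         item_id, rating = vals[0]
--         return 1, rating, [(item_id, rating)]
--     mid = n // 2
--     c1, s1, f1 = _summarize(vals[:mid])
--     c2, s2, f2 = _summarize(vals[mid:])
--     return c1 + c2, s1 + s2, f1 + f2
--
--
-- def group_by_user_reducer(user_id, values):
--     yield user_id, _summarize(list(values))
-- ===== Notes on version B (the rewrite author's own statement) =====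
-- stated objective: alternative
-- what changed: Replaces A's single fused accumulation loop by a divide-and-conquer recursion that splits the value list in half, summarizes each half, and merges the (count, sum, pairs) triples; correct because count, sum and concatenation are associative combiners.
import Mathlib
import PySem

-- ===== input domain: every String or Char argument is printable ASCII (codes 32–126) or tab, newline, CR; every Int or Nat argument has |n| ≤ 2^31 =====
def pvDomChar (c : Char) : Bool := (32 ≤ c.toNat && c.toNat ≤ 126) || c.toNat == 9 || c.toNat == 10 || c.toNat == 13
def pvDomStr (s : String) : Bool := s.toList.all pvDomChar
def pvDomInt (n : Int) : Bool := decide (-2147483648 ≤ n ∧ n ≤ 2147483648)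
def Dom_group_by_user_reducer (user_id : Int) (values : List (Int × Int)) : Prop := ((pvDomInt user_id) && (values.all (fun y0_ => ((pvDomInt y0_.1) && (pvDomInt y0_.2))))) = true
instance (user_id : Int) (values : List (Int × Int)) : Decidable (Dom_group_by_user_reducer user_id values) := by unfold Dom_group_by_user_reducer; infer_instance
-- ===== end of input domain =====

-- B replaces A's single fused accumulation loop by a divide-and-conquer recursion over halves; objective: alternative (same results, different algorithm).


-- ===== PORT A =====
-- A: one loop maintaining (item_count, item_sum, final); the generator yields one row → a one-element list.
def group_by_user_reducer (user_id : Int) (values : List (Int × Int)) : List (Int × (Int × Int × (List (Int × Int)))) :=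
  let st := values.foldl
    (fun (st : Int × Int × List (Int × Int)) v =>
      (st.1 + 1, st.2.1 + v.2, st.2.2 ++ [(v.1, v.2)]))
    (0, 0, [])
  [(user_id, st)]

-- ===== PORT B =====
-- B: divide and conquer — split the list in half, summarize each half, merge the (count, sum, pairs) triples.
def gburSummarize (vals : List (Int × Int)) : Int × Int × List (Int × Int) :=
  match vals with
  | [] => (0, 0, [])
  | [v] => (1, v.2, [(v.1, v.2)])
  | a :: b :: rest =>
    let vs := a :: b :: rest
    let mid := vs.length / 2
    let l := gburSummarize (vs.take mid)
    let r := gburSummarize (vs.drop mid)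
    (l.1 + r.1, l.2.1 + r.2.1, l.2.2 ++ r.2.2)
termination_by vals.length
decreasing_by
  · simp [List.length_take]; omega
  · simp [List.length_drop]; omega

def group_by_user_reducer_alt (user_id : Int) (values : List (Int × Int)) : List (Int × (Int × Int × (List (Int × Int)))) :=
  [(user_id, gburSummarize values)]

-- ===== PRECONDITION & SPEC =====
def Spec_group_by_user_reducer (user_id : Int) (values : List (Int × Int)) (out : List (Int × (Int × Int × (List (Int × Int))))) : Prop := out = group_by_user_reducer_alt user_id values
instance (user_id : Int) (values : List (Int × Int)) (out : List (Int × (Int × Int × (List (Int × Int))))) : Decidable (Spec_group_by_user_reducer user_id values out) := by unfold Spec_group_by_user_reducer; infer_instance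

-- ===== CLAIM (what is proved, stated in full; the proofs are below) =====
def Claim_equal_group_by_user_reducer : Prop := ∀ (user_id : Int) (values : List (Int × Int)), Dom_group_by_user_reducer user_id values → Spec_group_by_user_reducer user_id values (group_by_user_reducer user_id values)

-- ===== LEMMAS AND PROOFS =====

-- A's loop invariant: starting from any accumulator, the fold adds length, sum and appends the list.
theorem gbur_fold_inv (values : List (Int × Int)) (c s : Int) (f : List (Int × Int)) :
    values.foldl
      (fun (st : Int × Int × List (Int × Int)) v =>
        (st.1 + 1, st.2.1 + v.2, st.2.2 ++ [(v.1, v.2)]))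
      (c, s, f)
    = (c + (values.length : Int), s + (values.map (fun p => p.2)).sum, f ++ values) := by
  induction values generalizing c s f with
  | nil => simp
  | cons v vs ih =>
    simp [List.foldl, ih]
    constructor
    · ring
    · ring

-- B's recursion computes exactly (length, sum of ratings, the list itself).
theorem gbur_summarize_eq (vals : List (Int × Int)) :
    gburSummarize vals = ((vals.length : Int), (vals.map (fun p => p.2)).sum, vals) := by
  induction vals using gburSummarize.induct with
  | case1 => simp [gburSummarize]
  | case2 v => rw [gburSummarize]; simp
  | case3 a b rest vs mid ihl ihr =>
    rw [gburSummarize]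
    have ihl' : gburSummarize ((a :: b :: rest).take ((a :: b :: rest).length / 2)) =
        ((((a :: b :: rest).take ((a :: b :: rest).length / 2)).length : Int),
         (((a :: b :: rest).take ((a :: b :: rest).length / 2)).map (fun p => p.2)).sum,
         (a :: b :: rest).take ((a :: b :: rest).length / 2)) := ihl
    have ihr' : gburSummarize ((a :: b :: rest).drop ((a :: b :: rest).length / 2)) =
        ((((a :: b :: rest).drop ((a :: b :: rest).length / 2)).length : Int),
         (((a :: b :: rest).drop ((a :: b :: rest).length / 2)).map (fun p => p.2)).sum,
         (a :: b :: rest).drop ((a :: b :: rest).length / 2)) := ihr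
    have htd : (a :: b :: rest).take ((a :: b :: rest).length / 2) ++
        (a :: b :: rest).drop ((a :: b :: rest).length / 2) = a :: b :: rest :=
      List.take_append_drop _ _
    rw [ihl', ihr']
    have hlen : (List.take ((a :: b :: rest).length / 2) (a :: b :: rest)).length
        + (List.drop ((a :: b :: rest).length / 2) (a :: b :: rest)).length
        = (a :: b :: rest).length := by
      rw [← List.length_append, htd]
    have hsum : (List.map (fun p => p.2) (List.take ((a :: b :: rest).length / 2) (a :: b :: rest))).sum
        + (List.map (fun p => p.2) (List.drop ((a :: b :: rest).length / 2) (a :: b :: rest))).sum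
        = (List.map (fun (p : Int × Int) => p.2) (a :: b :: rest)).sum := by
      rw [← List.sum_append, ← List.map_append, htd]
    rw [Prod.mk.injEq, Prod.mk.injEq]
    exact ⟨by omega, by rw [← hsum], htd⟩

-- ===== VERDICT (by name: the statement is the Claim_ definition above) =====
theorem group_by_user_reducer_spec : Claim_equal_group_by_user_reducer := by
  intro user_id values _
  unfold Spec_group_by_user_reducer group_by_user_reducer group_by_user_reducer_alt
  simp [gbur_fold_inv, gbur_summarize_eq]
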